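-- pv_equiv track=rewrite | github.com/cctbx/cctbx_project | libtbx/langchain/agent/workflow_state.py | _classify_mtz_arrays
-- ===== SOURCE A (Python) =====
-- def _classify_mtz_arrays(arrays):
--     """Classify MTZ arrays into merged/anomalous with
--     a preferred default.
--
--     Args:
--         arrays: list of (label_string, is_anomalous)
--
--     Returns:
--         dict with "merged", "anomalous", "preferred" keys.
--     """
--     merged = None
--     anomalous = None
--     for label, is_anom in arrays:
--         if is_anom and anomalous is None:
--             anomalous = label
--         elif not is_anom and merged is None:
--             merged = label
--
--     # Ranking rule: default to merged (safer for MR/refine).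
--     # SAD/MAD workflows will override to anomalous based on
--     # experiment context in the command builder.
--     preferred = merged or anomalous
--     return {
--         "merged": merged,
--         "anomalous": anomalous,
--         "preferred": preferred,
--     }
-- ===== SOURCE B (Python) =====
-- def _classify_mtz_arrays(arrays):
--     merged = next((label for label, is_anom in arrays if not is_anom), None)
--     anomalous = next((label for label, is_anom in arrays if is_anom), None)
--     preferred = merged or anomalous
--     return {
--         "merged": merged,
--         "anomalous": anomalous,
--         "preferred": preferred,
--     }
-- ===== Notes on version B (the rewrite author's own statement) =====
-- stated objective: idiomatic
-- what changed: Replaced the fused stateful loop tracking two accumulators with two independent first-match searches via next() over generator expressions.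
import Mathlib
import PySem

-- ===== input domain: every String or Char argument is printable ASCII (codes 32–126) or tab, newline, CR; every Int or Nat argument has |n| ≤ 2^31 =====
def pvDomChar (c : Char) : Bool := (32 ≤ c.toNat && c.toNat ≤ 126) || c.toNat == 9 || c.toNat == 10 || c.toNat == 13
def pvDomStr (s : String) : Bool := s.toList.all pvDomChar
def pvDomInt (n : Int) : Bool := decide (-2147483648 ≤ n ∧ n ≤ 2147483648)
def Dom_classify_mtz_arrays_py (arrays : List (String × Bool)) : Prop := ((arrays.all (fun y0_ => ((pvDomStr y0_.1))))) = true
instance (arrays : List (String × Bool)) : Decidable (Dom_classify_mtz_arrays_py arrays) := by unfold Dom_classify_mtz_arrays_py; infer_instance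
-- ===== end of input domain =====

-- B replaces A's fused stateful loop with two independent first-match searches (idiomatic decomposition; same O(n) cost).


-- ===== PORT A =====
-- step of A's for-loop: updates (merged, anomalous) exactly as A's if/elif does
def classifyStepA (st : Option String × Option String) (p : String × Bool) :
    Option String × Option String :=
  if p.2 && st.2.isNone then (st.1, some p.1)
  else if !p.2 && st.1.isNone then (some p.1, st.2)
  else st

-- Python truthiness of `merged or anomalous` (None and "" are falsy)
def pyOrStr (m a : Option String) : Option String :=
  match m with
  | some s => if s = "" then a else some s
  | none => a

def classify_mtz_arrays_py (arrays : List (String × Bool)) : List (String × Option String) :=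
  let st := arrays.foldl classifyStepA (none, none)
  let merged := st.1
  let anomalous := st.2
  let preferred := pyOrStr merged anomalous
  [("merged", merged), ("anomalous", anomalous), ("preferred", preferred)]

-- ===== PORT B =====
def classify_mtz_arrays_py_alt (arrays : List (String × Bool)) : List (String × Option String) :=
  let merged := (arrays.find? (fun p => !p.2)).map Prod.fst
  let anomalous := (arrays.find? (fun p => p.2)).map Prod.fst
  let preferred := pyOrStr merged anomalous
  [("merged", merged), ("anomalous", anomalous), ("preferred", preferred)]

-- ===== PRECONDITION & SPEC =====
def Spec_classify_mtz_arrays_py (arrays : List (String × Bool)) (out : List (String × Option String)) : Prop := out = classify_mtz_arrays_py_alt arrays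
instance (arrays : List (String × Bool)) (out : List (String × Option String)) : Decidable (Spec_classify_mtz_arrays_py arrays out) := by unfold Spec_classify_mtz_arrays_py; infer_instance

-- ===== CLAIM (what is proved, stated in full; the proofs are below) =====
def Claim_equal_classify_mtz_arrays_py : Prop := ∀ (arrays : List (String × Bool)), Dom_classify_mtz_arrays_py arrays → Spec_classify_mtz_arrays_py arrays (classify_mtz_arrays_py arrays)

-- ===== LEMMAS AND PROOFS =====
theorem classifyFold_eq (l : List (String × Bool)) : ∀ (m a : Option String),
    l.foldl classifyStepA (m, a) =
      (m.or ((l.find? (fun p => !p.2)).map Prod.fst),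
       a.or ((l.find? (fun p => p.2)).map Prod.fst)) := by
  induction l with
  | nil => intro m a; simp
  | cons x xs ih =>
    intro m a
    cases hb : x.2 <;> cases hm : m <;> cases ha : a <;>
      simp [classifyStepA, hb, List.find?, ih]


-- ===== VERDICT (by name: the statement is the Claim_ definition above) =====
theorem classify_mtz_arrays_py_spec : Claim_equal_classify_mtz_arrays_py := by
  intro arrays _
  unfold Spec_classify_mtz_arrays_py classify_mtz_arrays_py classify_mtz_arrays_py_alt
  simp [classifyFold_eq arrays none none]
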